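-- pv_equiv track=rewrite | github.com/op2adi/NLP-Project | 5_endevaluation/learnable_gating/baseline2.py | span_to_token_index
-- ===== SOURCE A (Python) =====
-- def span_to_token_index(span_str, tokens, text):
--     if not span_str:
--         return -1
--     try:
--         start, end = map(int, span_str.split(':'))
--         char_pos = 0
--         for i, token in enumerate(tokens):
--             while char_pos < len(text) and text[char_pos].isspace():
--                 char_pos += 1
--             token_start = char_pos
--             token_end = char_pos + len(token)
--             if token_start <= start < token_end:
--                 return i
--             char_pos = token_end
--         return -1
--     except:
--         return -1
-- ===== SOURCE B (Python) =====
-- import bisect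
--
--
-- def span_to_token_index(span_str, tokens, text):
--     if not span_str:
--         return -1
--     try:
--         start, end = map(int, span_str.split(':'))
--     except:
--         return -1
--     # One pass builds the span table (same cursor rule: skip whitespace,
--     # token occupies [char_pos, char_pos + len(token))); then binary search.
--     starts = []
--     ends = []
--     char_pos = 0
--     for token in tokens:
--         while char_pos < len(text) and text[char_pos].isspace():
--             char_pos += 1
--         starts.append(char_pos)
--         char_pos += len(token)
--         ends.append(char_pos)
--     idx = bisect.bisect_right(starts, start) - 1
--     if idx >= 0 and start < ends[idx]:
--         return idx
--     return -1
-- ===== Notes on version B (the rewrite author's own statement) =====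
-- stated objective: alternative
-- what changed: A scans tokens with an early return testing each span against the start position; B builds the start/end span table in one pass and then finds the candidate token with bisect_right (rightmost token start <= start) followed by a single end-bound check.
import Mathlib
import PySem

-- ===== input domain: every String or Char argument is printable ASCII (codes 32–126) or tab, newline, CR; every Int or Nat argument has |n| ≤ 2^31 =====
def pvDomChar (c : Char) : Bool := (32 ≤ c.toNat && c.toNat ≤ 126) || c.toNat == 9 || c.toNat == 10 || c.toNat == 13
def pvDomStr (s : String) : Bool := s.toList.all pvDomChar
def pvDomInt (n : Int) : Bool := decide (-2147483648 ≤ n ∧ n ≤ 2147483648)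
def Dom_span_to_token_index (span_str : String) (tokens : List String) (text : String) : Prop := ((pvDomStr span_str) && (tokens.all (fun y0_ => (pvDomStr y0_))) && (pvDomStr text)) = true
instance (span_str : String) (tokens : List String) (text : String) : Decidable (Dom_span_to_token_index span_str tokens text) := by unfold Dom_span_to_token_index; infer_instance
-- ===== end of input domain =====

-- B replaces A's scan-with-early-return by a one-pass span table plus bisect_right; alternative decomposition, same cost.

-- ===== PORT A =====
-- `while char_pos < len(text) and text[char_pos].isspace(): char_pos += 1`
def pvSkipWs (text : List Char) (pos : Nat) : Nat :=
  if h : pos < text.length then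
    if PySem.Chars.isspace text[pos] then pvSkipWs text (pos + 1) else pos
  else pos
termination_by text.length - pos

-- the `for i, token in enumerate(tokens)` loop with its early `return i`
def pvALoop (start : Int) (text : List Char) (tokens : List String) (i : Nat) (charPos : Nat) : Int :=
  match tokens with
  | [] => -1
  | token :: rest =>
    let tokenStart := pvSkipWs text charPos
    let tokenEnd := tokenStart + token.toList.length
    if (tokenStart : Int) ≤ start ∧ start < (tokenEnd : Int) then (i : Int)
    else pvALoop start text rest (i + 1) tokenEnd

def span_to_token_index (span_str : String) (tokens : List String) (text : String) : Int :=
  if span_str = "" then -1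
  else
    -- `start, end = map(int, span_str.split(':'))`: any ValueError (wrong arity or a
    -- failing int()) is caught by the bare except and yields -1.
    match PySem.Str.split? span_str ":" with
    | some [sa, sb] =>
      match PySem.Int.ofStr? sa, PySem.Int.ofStr? sb with
      | some start, some _end => pvALoop start text.toList tokens 0 0
      | _, _ => -1
    | _ => -1

-- ===== PORT B =====
-- B's copy of the whitespace-skipping while loop
def pvSkipWsAlt (text : List Char) (pos : Nat) : Nat :=
  if h : pos < text.length then
    if PySem.Chars.isspace text[pos] then pvSkipWsAlt text (pos + 1) else pos
  else pos
termination_by text.length - pos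

-- the table-building `for token in tokens` loop: returns (starts, ends)
def pvBuild (text : List Char) (tokens : List String) (charPos : Nat) : List Int × List Int :=
  match tokens with
  | token :: rest =>
    let ts := pvSkipWsAlt text charPos
    let te := ts + token.toList.length
    let tail := pvBuild text rest te
    ((ts : Int) :: tail.1, (te : Int) :: tail.2)
  | [] => ([], [])

def span_to_token_index_alt (span_str : String) (tokens : List String) (text : String) : Int :=
  if span_str = "" then -1
  else
    match PySem.Str.split? span_str ":" with
    | none => -1
    | some parts =>
      match parts with
      | [] => -1
      | [_] => -1
      | _ :: _ :: _ :: _ => -1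
      | [sa, sb] =>
        match PySem.Int.ofStr? sa with
        | none => -1
        | some start =>
          match PySem.Int.ofStr? sb with
          | none => -1
          | some _end =>
            let se := pvBuild text.toList tokens 0
            let idx : Int := (PySem.List.bisectRight se.1 start : Int) - 1
            -- `ends[idx]`: whenever idx ≥ 0 it is < len(ends), so plain indexing never raises
            if 0 ≤ idx ∧ start < PySem.List.pyGetD se.2 idx 0 then idx else -1

-- ===== PRECONDITION & SPEC =====
def Spec_span_to_token_index (span_str : String) (tokens : List String) (text : String) (out : Int) : Prop := out = span_to_token_index_alt span_str tokens text
instance (span_str : String) (tokens : List String) (text : String) (out : Int) : Decidable (Spec_span_to_token_index span_str tokens text out) := by unfold Spec_span_to_token_index; infer_instance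

-- ===== CLAIM (what is proved, stated in full; the proofs are below) =====
def Claim_equal_span_to_token_index : Prop := ∀ (span_str : String) (tokens : List String) (text : String), Dom_span_to_token_index span_str tokens text → Spec_span_to_token_index span_str tokens text (span_to_token_index span_str tokens text)

-- ===== LEMMAS AND PROOFS =====

lemma pvSkipWsAlt_eq (text : List Char) (pos : Nat) : pvSkipWsAlt text pos = pvSkipWs text pos := by
  fun_induction pvSkipWsAlt with
  | case1 pos h hsp ih => rw [pvSkipWs, dif_pos h, if_pos hsp, ih]
  | case2 pos h hsp => rw [pvSkipWs, dif_pos h, if_neg hsp]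
  | case3 pos h => rw [pvSkipWs, dif_neg h]

lemma pvSkipWs_ge (text : List Char) (pos : Nat) : pos ≤ pvSkipWs text pos := by
  fun_induction pvSkipWs <;> omega

lemma pvBuild_len (text : List Char) (tokens : List String) (cp : Nat) :
    (pvBuild text tokens cp).1.length = tokens.length ∧
    (pvBuild text tokens cp).2.length = tokens.length := by
  induction tokens generalizing cp with
  | nil => simp [pvBuild]
  | cons t rest ih => simp [pvBuild, ih]

lemma pvBuild_lb (text : List Char) (tokens : List String) (cp : Nat) :
    ∀ x ∈ (pvBuild text tokens cp).1, (cp : Int) ≤ x := by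
  induction tokens generalizing cp with
  | nil => simp [pvBuild]
  | cons t rest ih =>
    intro x hx
    simp only [pvBuild, pvSkipWsAlt_eq, List.mem_cons] at hx
    have hge := pvSkipWs_ge text cp
    rcases hx with rfl | hx
    · exact_mod_cast hge
    · have := ih (pvSkipWs text cp + t.toList.length) x hx
      omega

lemma pvBuild_props (text : List Char) (tokens : List String) (cp : Nat) :
    ∀ (j : Nat) (hj : j < (pvBuild text tokens cp).1.length)
      (hj2 : j < (pvBuild text tokens cp).2.length),
      (pvBuild text tokens cp).1[j] ≤ (pvBuild text tokens cp).2[j] ∧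
      ∀ (k : Nat) (hk : k < (pvBuild text tokens cp).1.length), j < k →
        (pvBuild text tokens cp).2[j] ≤ (pvBuild text tokens cp).1[k] := by
  induction tokens generalizing cp with
  | nil => intro j hj; simp [pvBuild] at hj
  | cons t rest ih =>
    intro j hj hj2
    simp only [pvBuild, pvSkipWsAlt_eq, List.length_cons] at hj hj2 ⊢
    match j with
    | 0 =>
      refine ⟨by simp, ?_⟩
      intro k hk hkpos
      match k with
      | k' + 1 =>
        simp only [List.getElem_cons_succ, List.getElem_cons_zero]
        exact pvBuild_lb text rest (pvSkipWs text cp + t.toList.length) _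
          (List.getElem_mem _)
    | j' + 1 =>
      have hih := ih (pvSkipWs text cp + t.toList.length) j' (by omega) (by omega)
      refine ⟨by simpa using hih.1, ?_⟩
      intro k hk hjk
      match k with
      | k' + 1 =>
        simp only [List.getElem_cons_succ]
        exact hih.2 k' (by omega) (by omega)

lemma pvBuild_sorted (text : List Char) (tokens : List String) (cp : Nat) :
    ((pvBuild text tokens cp).1).Pairwise (· ≤ ·) := by
  rw [List.pairwise_iff_getElem]
  intro i j hi hj hij
  have hlen := pvBuild_len text tokens cp
  have hp := pvBuild_props text tokens cp i hi (by omega)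
  exact le_trans hp.1 (hp.2 j hj hij)

-- A's loop returns i + j when j is the first matching span
lemma pvALoop_found (start : Int) (text : List Char) :
    ∀ (tokens : List String) (cp i j : Nat)
      (hj : j < (pvBuild text tokens cp).1.length)
      (hj2 : j < (pvBuild text tokens cp).2.length),
      (pvBuild text tokens cp).1[j] ≤ start → start < (pvBuild text tokens cp).2[j] →
      (∀ (k : Nat) (hk : k < (pvBuild text tokens cp).1.length) (hk2 : k < (pvBuild text tokens cp).2.length),
        k < j → ¬((pvBuild text tokens cp).1[k] ≤ start ∧ start < (pvBuild text tokens cp).2[k])) →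
      pvALoop start text tokens i cp = (i : Int) + (j : Int) := by
  intro tokens
  induction tokens with
  | nil => intro cp i j hj; simp [pvBuild] at hj
  | cons t rest ih =>
    intro cp i j hj hj2 hs1 hs2 hno
    simp only [pvALoop]
    match j with
    | 0 =>
      simp only [pvBuild, pvSkipWsAlt_eq, List.getElem_cons_zero] at hs1 hs2
      rw [if_pos]
      · simp
      · push_cast at hs1 hs2 ⊢; exact ⟨hs1, hs2⟩
    | j' + 1 =>
      have h0 := hno 0 (by simp [pvBuild, pvSkipWsAlt_eq]) (by simp [pvBuild, pvSkipWsAlt_eq]) (by omega)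
      simp only [pvBuild, pvSkipWsAlt_eq, List.getElem_cons_zero] at h0
      rw [if_neg]
      · have := ih (pvSkipWs text cp + t.toList.length) (i + 1) j'
          (by simp only [pvBuild, pvSkipWsAlt_eq, List.length_cons] at hj; omega) (by simp only [pvBuild, pvSkipWsAlt_eq, List.length_cons] at hj2; omega)
          (by simpa only [pvBuild, pvSkipWsAlt_eq, List.length_cons, List.getElem_cons_succ, List.getElem_cons_zero] using hs1) (by simpa only [pvBuild, pvSkipWsAlt_eq, List.length_cons, List.getElem_cons_succ, List.getElem_cons_zero] using hs2)
          (fun k hk hk2 hkj => by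
            simpa only [pvBuild, pvSkipWsAlt_eq, List.length_cons, List.getElem_cons_succ, List.getElem_cons_zero] using
              hno (k + 1) (by simp only [pvBuild, pvSkipWsAlt_eq, List.length_cons]; omega) (by simp only [pvBuild, pvSkipWsAlt_eq, List.length_cons]; omega) (by omega))
        rw [this]; push_cast; ring
      · push_cast at h0 ⊢; exact h0


-- A's loop returns -1 when no span matches
lemma pvALoop_none (start : Int) (text : List Char) :
    ∀ (tokens : List String) (cp i : Nat),
      (∀ (k : Nat) (hk : k < (pvBuild text tokens cp).1.length) (hk2 : k < (pvBuild text tokens cp).2.length),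
        ¬((pvBuild text tokens cp).1[k] ≤ start ∧ start < (pvBuild text tokens cp).2[k])) →
      pvALoop start text tokens i cp = -1 := by
  intro tokens
  induction tokens with
  | nil => intro cp i _; simp [pvALoop]
  | cons t rest ih =>
    intro cp i hno
    have h0 := hno 0 (by simp [pvBuild, pvSkipWsAlt_eq]) (by simp [pvBuild, pvSkipWsAlt_eq])
    simp only [pvBuild, pvSkipWsAlt_eq, List.getElem_cons_zero] at h0
    simp only [pvALoop]
    rw [if_neg]
    · exact ih (pvSkipWs text cp + t.toList.length) (i + 1) (fun k hk hk2 => by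
        simpa only [pvBuild, pvSkipWsAlt_eq, List.length_cons, List.getElem_cons_succ, List.getElem_cons_zero] using
          hno (k + 1) (by simp only [pvBuild, pvSkipWsAlt_eq, List.length_cons]; omega) (by simp only [pvBuild, pvSkipWsAlt_eq, List.length_cons]; omega))
    · push_cast at h0 ⊢; exact h0


lemma loop_eq (start : Int) (text : List Char) (tokens : List String) :
    pvALoop start text tokens 0 0 =
      (let se := pvBuild text tokens 0
       let idx : Int := (PySem.List.bisectRight se.1 start : Int) - 1
       if 0 ≤ idx ∧ start < PySem.List.pyGetD se.2 idx 0 then idx else -1) := by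
  show pvALoop start text tokens 0 0 =
    (if 0 ≤ ((PySem.List.bisectRight (pvBuild text tokens 0).1 start : Int) - 1) ∧
        start < PySem.List.pyGetD (pvBuild text tokens 0).2
          ((PySem.List.bisectRight (pvBuild text tokens 0).1 start : Int) - 1) 0
     then ((PySem.List.bisectRight (pvBuild text tokens 0).1 start : Int) - 1) else -1)
  obtain ⟨hA, hB, hC⟩ :=
    PySem.List.bisectRight_spec (pvBuild text tokens 0).1 start (pvBuild_sorted text tokens 0)
  have hlen := pvBuild_len text tokens 0
  cases hr : PySem.List.bisectRight (pvBuild text tokens 0).1 start with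
  | zero =>
    rw [hr] at hC
    rw [if_neg (by norm_num)]
    exact pvALoop_none start text tokens 0 0
      (fun k hk hk2 hcontra => absurd hcontra.1 (not_le.mpr (hC k hk (by omega))))
  | succ m =>
    rw [hr] at hA hB hC
    have hm1 : m < (pvBuild text tokens 0).1.length := by omega
    have hm2 : m < (pvBuild text tokens 0).2.length := by omega
    have hcast : ((m + 1 : Nat) : Int) - 1 = ((m : Nat) : Int) := by push_cast; ring
    rw [hcast, PySem.List.pyGetD_natCast, List.getD_eq_getElem _ _ hm2]
    have hsm : (pvBuild text tokens 0).1[m] ≤ start := hB m hm1 (by omega)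
    by_cases hlt : start < (pvBuild text tokens 0).2[m]
    · rw [if_pos ⟨Int.natCast_nonneg m, hlt⟩]
      have := pvALoop_found start text tokens 0 0 m hm1 hm2 hsm hlt
        (fun k hk hk2 hkm hcontra => by
          have hchain := (pvBuild_props text tokens 0 k hk hk2).2 m hm1 hkm
          omega)
      simpa using this
    · rw [if_neg (by tauto)]
      refine pvALoop_none start text tokens 0 0 (fun k hk hk2 hcontra => ?_)
      rcases lt_trichotomy k m with hkm | rfl | hkm
      · have hchain := (pvBuild_props text tokens 0 k hk hk2).2 m hm1 hkm
        omega
      · exact hlt hcontra.2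
      · have := hC k hk (by omega)
        omega

-- ===== VERDICT (by name: the statement is the Claim_ definition above) =====
theorem span_to_token_index_spec : Claim_equal_span_to_token_index := by
  intro span_str tokens text _
  unfold Spec_span_to_token_index span_to_token_index span_to_token_index_alt
  by_cases h : span_str = ""
  · simp [h]
  · simp only [h, if_false]
    cases hsplit : PySem.Str.split? span_str ":" with
    | none => simp
    | some parts =>
      match parts with
      | [] => rfl
      | [_] => rfl
      | [sa, sb] =>
        cases ha : PySem.Int.ofStr? sa with
        | none => simp [ha]
        | some start =>
          cases hb : PySem.Int.ofStr? sb with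
          | none => simp [ha, hb]
          | some e => simpa [ha, hb] using loop_eq start text.toList tokens
      | _ :: _ :: _ :: _ => rfl
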